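-- pv_equiv track=rewrite | github.com/vphpersson/pyutils | pyutils/my_string.py | text_align_delimiter
-- ===== SOURCE A (Python) =====
-- def text_align_delimiter(text: str, delimiter: str = ': ', put_non_match_after_delimiter: bool = True) -> str:
--     """
--     Align a multi-line text around a delimiter.
--
--     :param text: The text to be aligned.
--     :param delimiter: The delimiter to align around.
--     :param put_non_match_after_delimiter: Whether lines in the text not having the delimiter should be put after the
--         alignment position.
--     :return: The input text aligned around the specified delimiter.
--     """
--
--     max_delimiter_pos: int = max(
--         line.find(delimiter)
--         for line in text.splitlines()
--     )
--
--     return '\n'.join(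
--         (
--             (line[:delimiter_pos].rjust(max_delimiter_pos) + line[delimiter_pos:])
--             if (delimiter_pos := line.find(delimiter)) != -1 else (
--                 (' ' * (max_delimiter_pos + len(delimiter)) + line) if (line and put_non_match_after_delimiter) else line
--             )
--         )
--         for line in text.splitlines()
--     )
-- ===== SOURCE B (Python) =====
-- def text_align_delimiter(text: str, delimiter: str = ': ', put_non_match_after_delimiter: bool = True) -> str:
--     # Online single pass: keep a running maximum delimiter position and, when a
--     # larger one appears, retroactively re-pad the eligible lines emitted so far.
--     out = []  # pairs (formatted_line, eligible_for_repadding)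
--     mx = -1
--     for line in text.splitlines():
--         pos = line.find(delimiter)
--         if pos > mx:
--             d = pos - mx
--             out = [(' ' * d + s, e) if e else (s, e) for s, e in out]
--             mx = pos
--         if pos != -1:
--             out.append((' ' * (mx - pos) + line, True))
--         elif line and put_non_match_after_delimiter:
--             out.append((' ' * (mx + len(delimiter)) + line, True))
--         else:
--             out.append((line, False))
--     return '\n'.join(s for s, _ in out)
-- ===== Notes on version B (the rewrite author's own statement) =====
-- stated objective: alternative
-- what changed: B is an online single pass: it formats each line against the running maximum delimiter position seen so far and, when a larger position appears, retroactively re-pads the eligible lines already emitted, instead of A's two full passes (max over all finds, then format every line).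
import Mathlib
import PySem

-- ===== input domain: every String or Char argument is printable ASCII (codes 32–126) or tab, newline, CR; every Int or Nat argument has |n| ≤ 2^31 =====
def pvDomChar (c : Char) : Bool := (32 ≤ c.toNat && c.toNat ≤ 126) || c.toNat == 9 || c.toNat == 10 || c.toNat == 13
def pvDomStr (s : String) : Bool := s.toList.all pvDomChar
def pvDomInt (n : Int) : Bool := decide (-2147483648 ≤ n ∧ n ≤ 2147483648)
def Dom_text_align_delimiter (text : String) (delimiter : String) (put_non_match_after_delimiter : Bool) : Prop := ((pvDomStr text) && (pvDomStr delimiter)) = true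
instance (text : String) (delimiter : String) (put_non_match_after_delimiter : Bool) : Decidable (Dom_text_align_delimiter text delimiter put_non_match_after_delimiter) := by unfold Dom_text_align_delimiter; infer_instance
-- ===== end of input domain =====

-- B replaces A's two passes (max over all finds, then format) by an online single pass that
-- re-pads already-emitted eligible lines when a larger delimiter position appears; objective: alternative.

-- ===== PORT A =====
-- s.rjust(w) with spaces (exact: pads on the left iff len(s) < w)
def pyRjust (s : List Char) (w : Int) : List Char :=
  List.replicate (w - s.length).toNat ' ' ++ s

def text_align_delimiter (text : String) (delimiter : String) (put_non_match_after_delimiter : Bool) : String :=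
  let lines := PySem.Str.splitlines text
  -- max(...) over an empty generator raises ValueError in Python: excluded by Pre_ (none branch)
  match PySem.List.max? (lines.map (fun line => PySem.Str.find line delimiter)) (fun x => x) with
  | none => ""
  | some maxPos =>
    PySem.Str.join "\n" (lines.map (fun line =>
      let delimiterPos := PySem.Str.find line delimiter
      if delimiterPos ≠ -1 then
        String.ofList (pyRjust (PySem.Str.slice line none (some delimiterPos)).toList maxPos
          ++ (PySem.Str.slice line (some delimiterPos) none).toList)
      else if line ≠ "" ∧ put_non_match_after_delimiter then
        String.ofList (List.replicate (maxPos + (PySem.Str.len delimiter : Int)).toNat ' ' ++ line.toList)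
      else line))

-- ===== PORT B =====
-- one loop iteration: possibly re-pad the emitted eligible lines, then emit the current line
def stepB (delimiter : String) (flag : Bool) (st : Int × List (String × Bool)) (line : String) : Int × List (String × Bool) :=
  let pos := PySem.Str.find line delimiter
  let mx := if pos > st.1 then pos else st.1
  let out := if pos > st.1 then
      st.2.map (fun p => if p.2 then (String.ofList (List.replicate (pos - st.1).toNat ' ' ++ p.1.toList), p.2) else p)
    else st.2
  if pos ≠ -1 then
    (mx, out ++ [(String.ofList (List.replicate (mx - pos).toNat ' ' ++ line.toList), true)])
  else if line ≠ "" ∧ flag then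
    (mx, out ++ [(String.ofList (List.replicate (mx + (PySem.Str.len delimiter : Int)).toNat ' ' ++ line.toList), true)])
  else
    (mx, out ++ [(line, false)])

def text_align_delimiter_alt (text : String) (delimiter : String) (put_non_match_after_delimiter : Bool) : String :=
  let st := (PySem.Str.splitlines text).foldl (stepB delimiter put_non_match_after_delimiter) (-1, [])
  PySem.Str.join "\n" (st.2.map (fun p => p.1))

-- ===== PRECONDITION & SPEC =====
-- Pre_ excludes only empty text: splitlines() is then empty and Python's max() raises ValueError in A.
def Pre_text_align_delimiter (text : String) (delimiter : String) (put_non_match_after_delimiter : Bool) : Prop := text ≠ ""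
instance (text : String) (delimiter : String) (put_non_match_after_delimiter : Bool) : Decidable (Pre_text_align_delimiter text delimiter put_non_match_after_delimiter) := by unfold Pre_text_align_delimiter; infer_instance

def pvWitness_text_align_delimiter : String × String × Bool := ("name: 1\nlonger name: 2\nplain", ": ", true)

def Spec_text_align_delimiter (text : String) (delimiter : String) (put_non_match_after_delimiter : Bool) (out : String) : Prop := out = text_align_delimiter_alt text delimiter put_non_match_after_delimiter
instance (text : String) (delimiter : String) (put_non_match_after_delimiter : Bool) (out : String) : Decidable (Spec_text_align_delimiter text delimiter put_non_match_after_delimiter out) := by unfold Spec_text_align_delimiter; infer_instance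

-- ===== CLAIM (what is proved, stated in full; the proofs are below) =====
def Claim_equal_text_align_delimiter : Prop := ∀ (text : String) (delimiter : String) (put_non_match_after_delimiter : Bool), Dom_text_align_delimiter text delimiter put_non_match_after_delimiter → Pre_text_align_delimiter text delimiter put_non_match_after_delimiter → Spec_text_align_delimiter text delimiter put_non_match_after_delimiter (text_align_delimiter text delimiter put_non_match_after_delimiter)

-- ===== LEMMAS AND PROOFS =====

-- the value B holds for a line once the running max is M (proof-side characterisation)
def entryB (delimiter : String) (flag : Bool) (M : Int) (line : String) : String × Bool :=
  let pos := PySem.Str.find line delimiter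
  if pos ≠ -1 then
    (String.ofList (List.replicate (M - pos).toNat ' ' ++ line.toList), true)
  else if line ≠ "" ∧ flag then
    (String.ofList (List.replicate (M + (PySem.Str.len delimiter : Int)).toNat ' ' ++ line.toList), true)
  else (line, false)

def maxOf (delimiter : String) (L : List String) : Int :=
  L.foldl (fun a l => max a (PySem.Str.find l delimiter)) (-1)

theorem find_ge_neg_one (l d : String) : -1 ≤ PySem.Str.find l d := by
  simp [PySem.Str.find_eq]; exact PySem.Chars.neg_one_le_find _ _

theorem foldl_max_init_le (d : String) : ∀ (L : List String) (a : Int),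
    a ≤ L.foldl (fun a l => max a (PySem.Str.find l d)) a := by
  intro L
  induction L with
  | nil => intro a; simp
  | cons h t ih =>
    intro a
    calc a ≤ max a (PySem.Str.find h d) := le_max_left _ _
    _ ≤ _ := ih _

theorem maxOf_ge_neg_one (d : String) (L : List String) : -1 ≤ maxOf d L :=
  foldl_max_init_le d L (-1)

theorem foldl_max_mono (d : String) : ∀ (L : List String) (a b : Int), a ≤ b →
    L.foldl (fun a l => max a (PySem.Str.find l d)) a ≤ L.foldl (fun a l => max a (PySem.Str.find l d)) b := by
  intro L
  induction L with
  | nil => intro a b h; simpa using h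
  | cons h t ih =>
    intro a b hab
    simp only [List.foldl_cons]
    exact ih _ _ (max_le_max_right _ hab)

theorem find_le_maxOf (d : String) : ∀ {L : List String} {l : String}, l ∈ L →
    PySem.Str.find l d ≤ maxOf d L := by
  intro L
  induction L with
  | nil => intro l h; cases h
  | cons h t ih =>
    intro l hm
    rcases List.mem_cons.mp hm with rfl | hm
    · unfold maxOf
      simp only [List.foldl_cons]
      calc PySem.Str.find l d ≤ max (-1) (PySem.Str.find l d) := le_max_right _ _
      _ ≤ _ := foldl_max_init_le d t _
    · exact le_trans (ih hm) (by
        unfold maxOf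
        simp only [List.foldl_cons]
        -- foldl with init -1 vs init max(-1, find h): monotone in init
        exact foldl_max_mono d t _ _ (le_max_left _ _))


theorem maxOf_append_singleton (d : String) (P : List String) (l : String) :
    maxOf d (P ++ [l]) = max (maxOf d P) (PySem.Str.find l d) := by
  unfold maxOf
  rw [List.foldl_append]
  rfl


-- re-padding an eligible entry by (mx' - mx) spaces moves it to the larger max
theorem entryB_repad (d : String) (f : Bool) (l : String) (mx mx' : Int)
    (h1 : PySem.Str.find l d ≤ mx) (h2 : -1 ≤ mx) (h3 : mx ≤ mx') :
    (if (entryB d f mx l).2 then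
       (String.ofList (List.replicate (mx' - mx).toNat ' ' ++ (entryB d f mx l).1.toList), (entryB d f mx l).2)
     else entryB d f mx l) = entryB d f mx' l := by
  have hge := find_ge_neg_one l d
  have hfe : PySem.Str.find l d = PySem.Chars.find l.toList d.toList := by simp
  rw [hfe] at h1 hge
  by_cases h : PySem.Chars.find l.toList d.toList = -1
  · by_cases hf : l ≠ "" ∧ f
    · have hd : d.toList ≠ [] := by
        intro hnil; rw [hnil, PySem.Chars.find_nil] at h; omega
      have hlen : 1 ≤ (d.length : Int) := by
        have h1 := List.length_pos_iff.mpr hd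
        have h2 : d.toList.length = d.length := String.length_toList
        omega
      have e : (mx' - mx).toNat + (mx + (d.length : Int)).toNat
          = (mx' + (d.length : Int)).toNat := by omega
      simp [entryB, h, hf]
      refine String.toList_injective ?_
      simp
      rw [← List.append_assoc, ← List.replicate_add, e]
    · simp [entryB, h, hf]
  · have e : (mx' - mx).toNat + (mx - PySem.Chars.find l.toList d.toList).toNat
        = (mx' - PySem.Chars.find l.toList d.toList).toNat := by omega
    simp [entryB, h]
    refine String.toList_injective ?_
    simp
    rw [← List.append_assoc, ← List.replicate_add, e]

theorem repad_map (d : String) (f : Bool) (P : List String) (mx mx' : Int)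
    (hmx : -1 ≤ mx) (hub : ∀ l ∈ P, PySem.Str.find l d ≤ mx) (h3 : mx ≤ mx') :
    (P.map (entryB d f mx)).map
      (fun p => if p.2 then (String.ofList (List.replicate (mx' - mx).toNat ' ' ++ p.1.toList), p.2) else p)
    = P.map (entryB d f mx') := by
  rw [List.map_map]
  exact List.map_congr_left fun l hl => entryB_repad d f l mx mx' (hub l hl) hmx h3

-- one step of B maintains the invariant
theorem stepB_entry (d : String) (f : Bool) (P : List String) (line : String) :
    stepB d f (maxOf d P, P.map (entryB d f (maxOf d P))) line
    = (maxOf d (P ++ [line]), (P ++ [line]).map (entryB d f (maxOf d (P ++ [line])))) := by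
  have hmax := maxOf_append_singleton d P line
  have hge := find_ge_neg_one line d
  have hmxge := maxOf_ge_neg_one d P
  unfold stepB
  by_cases hgt : PySem.Str.find line d > maxOf d P
  · have hm' : maxOf d (P ++ [line]) = PySem.Str.find line d := by rw [hmax]; omega
    simp only [hgt, if_true, ite_true, hm', List.map_append]
    rw [repad_map d f P (maxOf d P) (PySem.Str.find line d) hmxge
      (fun l hl => find_le_maxOf d hl) (le_of_lt hgt)]
    by_cases h : PySem.Chars.find line.toList d.toList = -1
    · by_cases hlf : line ≠ "" ∧ f <;> simp [entryB, h, hlf]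
    · simp [entryB, h]
  · have hm' : maxOf d (P ++ [line]) = maxOf d P := by rw [hmax]; omega
    simp only [hgt, if_false, ite_false, hm', List.map_append]
    by_cases h : PySem.Chars.find line.toList d.toList = -1
    · by_cases hlf : line ≠ "" ∧ f <;> simp [entryB, h, hlf]
    · simp [entryB, h]

theorem foldB (d : String) (f : Bool) : ∀ (L P : List String),
    L.foldl (stepB d f) (maxOf d P, P.map (entryB d f (maxOf d P)))
    = (maxOf d (P ++ L), (P ++ L).map (entryB d f (maxOf d (P ++ L)))) := by
  intro L
  induction L with
  | nil => intro P; simp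
  | cons h t ih =>
    intro P
    rw [List.foldl_cons, stepB_entry, ih (P ++ [h])]
    simp

-- per-line agreement of A's formatting expression with entryB's string
theorem perLine (line delimiter : String) (maxPos : Int) (flag : Bool) :
    (if PySem.Str.find line delimiter ≠ -1 then
       String.ofList (pyRjust (PySem.Str.slice line none (some (PySem.Str.find line delimiter))).toList maxPos
         ++ (PySem.Str.slice line (some (PySem.Str.find line delimiter)) none).toList)
     else if line ≠ "" ∧ flag then
       String.ofList (List.replicate (maxPos + (PySem.Str.len delimiter : Int)).toNat ' ' ++ line.toList)
     else line)
    = (entryB delimiter flag maxPos line).1 := by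
  unfold entryB
  have hm1 := PySem.Chars.neg_one_le_find line.toList delimiter.toList
  have hlen := PySem.Chars.find_le_length line.toList delimiter.toList
  by_cases h : PySem.Chars.find line.toList delimiter.toList = -1
  · simp only [PySem.Str.find_eq, h]
    by_cases hf : line ≠ "" ∧ flag <;> simp [hf]
  · have hge : (0 : Int) ≤ PySem.Chars.find line.toList delimiter.toList := by omega
    obtain ⟨n, hn⟩ : ∃ n : Nat, PySem.Chars.find line.toList delimiter.toList = (n : Int) :=
      ⟨_, (Int.toNat_of_nonneg hge).symm⟩
    have hnle : n ≤ line.toList.length := by omega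
    simp only [PySem.Str.find_eq, hn, ne_eq]
    rw [if_pos (by omega), if_pos (by omega)]
    simp [pyRjust, PySem.List.slice_to, PySem.List.slice_from, List.length_take]
    have hnle' : (n : Int) ≤ (line.length : Int) := by
      rw [← String.length_toList]; exact_mod_cast hnle
    rw [min_eq_left hnle']
    rw [show (maxPos - (n : Int)).toNat = maxPos.toNat - n by omega]

-- ===== VERDICT (by name: the statement is the Claim_ definition above) =====
theorem text_align_delimiter_spec : Claim_equal_text_align_delimiter := by
  intro text delimiter flag _ _
  unfold Spec_text_align_delimiter text_align_delimiter text_align_delimiter_alt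
  have hfold := foldB delimiter flag (PySem.Str.splitlines text) []
  simp only [List.nil_append] at hfold
  have hinit : ((-1 : Int), ([] : List (String × Bool)))
      = (maxOf delimiter [], ([] : List String).map (entryB delimiter flag (maxOf delimiter []))) := rfl
  rw [hinit, hfold]
  cases hL : PySem.Str.splitlines text with
  | nil => rfl
  | cons l t =>
    have hmax? : PySem.List.max? ((l :: t).map (fun line => PySem.Str.find line delimiter)) (fun x => x)
        = some (maxOf delimiter (l :: t)) := by
      rw [List.map_cons, PySem.List.max?_id_cons]
      congr 1
      rw [List.foldl_map]
      unfold maxOf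
      simp only [List.foldl_cons]
      congr 1
      exact (max_eq_right (find_ge_neg_one l delimiter)).symm
    simp only [hL, hmax?]
    congr 1
    rw [List.map_map]
    exact List.map_congr_left fun line _ => perLine line delimiter _ flag
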